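-- pv_equiv track=rewrite | github.com/yangence/circFL-refine | simu/circFL-simu.py | getAllCirc
-- ===== SOURCE A (Python) =====
-- def getMaxIntronLen(x):
--     tmpMax=0
--     for i in range(0,len(x)-1):
--         each1=x[i]
--         each2=x[i+1]
--         tmp=each2[0]-each1[1]
--         if tmp>tmpMax:
--             tmpMax=tmp
--     return(tmpMax)
--
-- def getAllCirc(exon,maxLen=5000,maxIntronLen=200000):
--     exonArr=[]
--     for i in range(len(exon)):
--         for j in range(i,len(exon)):
--             tmp=exon[i:(j+1)]
--             exonLen=sum([(i[1]-i[0]) for i in tmp])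
--             if exonLen<maxLen:
--                 if len(tmp)>1:
--                     maxIntron=getMaxIntronLen(tmp)
--                     if maxIntron<maxIntronLen:
--                         exonArr.append(tmp)
--                 else:
--                     exonArr.append(tmp)
--     return(exonArr)
-- ===== SOURCE B (Python) =====
-- def getAllCirc(exon, maxLen=5000, maxIntronLen=200000):
--     # One incremental pass per start index: running exon-length sum and running
--     # max intron, instead of re-slicing and re-summing for every (i, j) pair.
--     res = []
--     for i in range(len(exon)):
--         cur = []
--         s = 0
--         m = 0
--         prev_end = None
--         for start, end in exon[i:]:
--             cur = cur + [(start, end)]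
--             s += end - start
--             if prev_end is not None and start - prev_end > m:
--                 m = start - prev_end
--             if s < maxLen and (len(cur) == 1 or m < maxIntronLen):
--                 res.append(cur)
--             prev_end = end
--     return res
-- ===== Notes on version B (the rewrite author's own statement) =====
-- stated objective: faster
-- what changed: Instead of re-slicing exon[i:j+1] and recomputing its length sum and max intron from scratch for every pair (i,j), B makes one incremental pass per start index, maintaining a running length sum and running max intron as the window extends.
import Mathlib
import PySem

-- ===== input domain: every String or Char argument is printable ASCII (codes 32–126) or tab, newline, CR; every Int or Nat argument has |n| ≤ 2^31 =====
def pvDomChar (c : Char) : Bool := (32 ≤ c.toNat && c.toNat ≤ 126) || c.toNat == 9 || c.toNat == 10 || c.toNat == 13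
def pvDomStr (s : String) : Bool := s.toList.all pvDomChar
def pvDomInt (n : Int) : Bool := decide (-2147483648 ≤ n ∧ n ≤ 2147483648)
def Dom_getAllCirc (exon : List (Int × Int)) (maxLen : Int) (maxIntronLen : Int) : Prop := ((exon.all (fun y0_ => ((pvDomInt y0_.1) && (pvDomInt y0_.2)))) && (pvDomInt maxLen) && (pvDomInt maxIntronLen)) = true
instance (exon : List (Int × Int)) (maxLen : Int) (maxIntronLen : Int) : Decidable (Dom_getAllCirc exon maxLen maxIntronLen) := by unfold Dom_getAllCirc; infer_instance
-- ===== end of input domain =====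

-- B replaces A's per-pair re-slice/re-sum with one incremental pass per start index
-- (running length sum, running max intron); objective: faster.

-- ===== PORT A =====
def getMaxIntronLen (x : List (Int × Int)) : Int :=
  (PySem.List.pyRange 0 ((x.length : Int) - 1) 1).foldl
    (fun tmpMax i =>
      let each1 := PySem.List.pyGetD x i (0, 0)
      let each2 := PySem.List.pyGetD x (i + 1) (0, 0)
      let tmp := each2.1 - each1.2
      if tmp > tmpMax then tmp else tmpMax) 0

def getAllCirc (exon : List (Int × Int)) (maxLen : Int) (maxIntronLen : Int) : List (List (Int × Int)) :=
  (PySem.List.pyRange 0 (exon.length : Int) 1).foldl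
    (fun exonArr i =>
      (PySem.List.pyRange i (exon.length : Int) 1).foldl
        (fun exonArr j =>
          let tmp := PySem.List.slice exon (some i) (some (j + 1))
          let exonLen := (tmp.map (fun p => p.2 - p.1)).sum
          if exonLen < maxLen then
            if tmp.length > 1 then
              if getMaxIntronLen tmp < maxIntronLen then exonArr ++ [tmp] else exonArr
            else exonArr ++ [tmp]
          else exonArr)
        exonArr)
    []

-- ===== PORT B =====
-- inner loop of Source B: running sum s, running max intron m, last exon end prevEnd
def circInner (maxLen maxIntronLen : Int) (cur : List (Int × Int)) (s m : Int)
    (prevEnd : Option Int) (res : List (List (Int × Int))) :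
    List (Int × Int) → List (List (Int × Int))
  | [] => res
  | (a, b) :: rest =>
      let cur' := cur ++ [(a, b)]
      let s' := s + (b - a)
      let m' := match prevEnd with
        | none => m
        | some pe => if a - pe > m then a - pe else m
      let res' := if s' < maxLen ∧ (cur'.length = 1 ∨ m' < maxIntronLen)
                  then res ++ [cur'] else res
      circInner maxLen maxIntronLen cur' s' m' (some b) res' rest

-- outer loop of Source B: one incremental pass per start suffix exon[i:]
def circOuter (maxLen maxIntronLen : Int) (res : List (List (Int × Int))) :
    List (Int × Int) → List (List (Int × Int))
  | [] => res
  | x :: rest =>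
      circOuter maxLen maxIntronLen
        (circInner maxLen maxIntronLen [] 0 0 none res (x :: rest)) rest

def getAllCirc_alt (exon : List (Int × Int)) (maxLen : Int) (maxIntronLen : Int) : List (List (Int × Int)) :=
  circOuter maxLen maxIntronLen [] exon

-- ===== PRECONDITION & SPEC =====
def Spec_getAllCirc (exon : List (Int × Int)) (maxLen : Int) (maxIntronLen : Int) (out : List (List (Int × Int))) : Prop := out = getAllCirc_alt exon maxLen maxIntronLen
instance (exon : List (Int × Int)) (maxLen : Int) (maxIntronLen : Int) (out : List (List (Int × Int))) : Decidable (Spec_getAllCirc exon maxLen maxIntronLen out) := by unfold Spec_getAllCirc; infer_instance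

-- ===== CLAIM (what is proved, stated in full; the proofs are below) =====
def Claim_equal_getAllCirc : Prop := ∀ (exon : List (Int × Int)) (maxLen : Int) (maxIntronLen : Int), Dom_getAllCirc exon maxLen maxIntronLen → Spec_getAllCirc exon maxLen maxIntronLen (getAllCirc exon maxLen maxIntronLen)

-- ===== LEMMAS AND PROOFS =====

-- total exon length of a candidate
def sumLen (l : List (Int × Int)) : Int := (l.map (fun p => p.2 - p.1)).sum

-- one step of the running max intron
def gapStep (m : Int) (pr : (Int × Int) × (Int × Int)) : Int :=
  if pr.2.1 - pr.1.2 > m then pr.2.1 - pr.1.2 else m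

-- max intron of a candidate, over adjacent pairs
def gapMax (l : List (Int × Int)) : Int := (l.zip l.tail).foldl gapStep 0

-- acceptance condition for a (nonempty) candidate
def condC (maxLen maxIntronLen : Int) (tmp : List (Int × Int)) : Bool :=
  decide (sumLen tmp < maxLen ∧ (tmp.length = 1 ∨ gapMax tmp < maxIntronLen))

-- accepted prefixes of one suffix
def accepted (maxLen maxIntronLen : Int) (d : List (Int × Int)) : List (List (Int × Int)) :=
  ((List.range d.length).filter (fun k => condC maxLen maxIntronLen (d.take (k + 1)))).map
    (fun k => d.take (k + 1))

-- accepted prefixes of all suffixes, in order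
def tailsAcc (maxLen maxIntronLen : Int) : List (Int × Int) → List (List (Int × Int))
  | [] => []
  | x :: r => accepted maxLen maxIntronLen (x :: r) ++ tailsAcc maxLen maxIntronLen r

theorem sumLen_snoc (l : List (Int × Int)) (a b : Int) :
    sumLen (l ++ [(a, b)]) = sumLen l + (b - a) := by
  simp [sumLen]

theorem zip_tail_snoc (l : List (Int × Int)) (h : l ≠ []) (y : Int × Int) :
    (l ++ [y]).zip (l ++ [y]).tail = l.zip l.tail ++ [(l.getLast h, y)] := by
  induction l with
  | nil => exact absurd rfl h
  | cons x t ih =>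
      cases t with
      | nil => simp
      | cons c r =>
          have := ih (by simp)
          simp_all [List.getLast]

theorem gapMax_snoc (l : List (Int × Int)) (h : l ≠ []) (y : Int × Int) :
    gapMax (l ++ [y]) = gapStep (gapMax l) (l.getLast h, y) := by
  unfold gapMax
  rw [zip_tail_snoc l h y, List.foldl_append]
  rfl

theorem getMaxIntronLen_eq_gapMax (x : List (Int × Int)) :
    getMaxIntronLen x = gapMax x := by
  have hmap : (PySem.List.pyRange 0 ((x.length : Int) - 1) 1).map
      (fun i => (PySem.List.pyGetD x i (0, 0), PySem.List.pyGetD x (i + 1) (0, 0)))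
      = x.zip x.tail := by
    apply List.ext_getElem
    · simp [PySem.List.length_pyRange_one]
    · intro k hk1 hk2
      have hk : k < x.length - 1 := by
        simpa [PySem.List.length_pyRange_one] using hk1
      have hk' : (k : Int) < (x.length : Int) := by omega
      have hk'' : (k : Int) + 1 < (x.length : Int) := by omega
      simp only [List.getElem_map, PySem.List.getElem_pyRange_one, zero_add]
      rw [PySem.List.pyGetD_eq_getElem x (0, 0) (by positivity) hk',
          PySem.List.pyGetD_eq_getElem x (0, 0) (by positivity) hk'']
      have h1 : ((k : Int)).toNat = k := by omega
      have h2 : ((k : Int) + 1).toNat = k + 1 := by omega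
      simp [h1, h2, List.getElem_zip, List.getElem_tail]
  unfold getMaxIntronLen gapMax
  rw [← hmap, List.foldl_map]
  rfl

theorem circInner_spec (maxLen maxIntronLen : Int) :
    ∀ (rest cur : List (Int × Int)) (res : List (List (Int × Int))),
      circInner maxLen maxIntronLen cur (sumLen cur) (gapMax cur)
          ((cur.getLast?).map Prod.snd) res rest
        = res ++ ((List.range rest.length).filter
              (fun k => condC maxLen maxIntronLen (cur ++ rest.take (k + 1)))).map
            (fun k => cur ++ rest.take (k + 1)) := by
  intro rest
  induction rest with
  | nil => intro cur res; simp [circInner]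
  | cons p rest ih =>
      intro cur res
      obtain ⟨a, b⟩ := p
      have hm' : (match (cur.getLast?).map Prod.snd with
          | none => gapMax cur
          | some pe => if a - pe > gapMax cur then a - pe else gapMax cur)
          = gapMax (cur ++ [(a, b)]) := by
        cases hcur : cur.getLast? with
        | none =>
            have hnil : cur = [] := by
              cases cur with
              | nil => rfl
              | cons c t => simp at hcur
            subst hnil; simp [gapMax]
        | some last =>
            have hne : cur ≠ [] := by intro h; subst h; simp at hcur
            have hlast : cur.getLast hne = last := by
              rw [List.getLast_eq_iff_getLast?_eq_some]; exact hcur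
            rw [gapMax_snoc cur hne (a, b), hlast]
            simp [gapStep]
      show circInner maxLen maxIntronLen (cur ++ [(a, b)]) (sumLen cur + (b - a)) _ (some b) _ rest = _
      rw [show sumLen cur + (b - a) = sumLen (cur ++ [(a, b)]) from (sumLen_snoc cur a b).symm,
          hm']
      have hlast' : (some b) = (((cur ++ [(a, b)]).getLast?).map Prod.snd) := by simp
      rw [hlast', ih (cur ++ [(a, b)])]
      have hcond : (if sumLen (cur ++ [(a,b)]) < maxLen ∧ ((cur ++ [(a,b)]).length = 1 ∨ gapMax (cur ++ [(a,b)]) < maxIntronLen)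
           then res ++ [cur ++ [(a,b)]] else res)
          = res ++ (if condC maxLen maxIntronLen (cur ++ [(a,b)]) then [cur ++ [(a,b)]] else []) := by
        by_cases h : sumLen (cur ++ [(a,b)]) < maxLen ∧ ((cur ++ [(a,b)]).length = 1 ∨ gapMax (cur ++ [(a,b)]) < maxIntronLen)
        · rw [if_pos h, if_pos (by simpa [condC] using h)]
        · rw [if_neg h, if_neg (by simpa [condC] using h), List.append_nil]
      rw [hcond]
      have key : ((List.range (rest.length + 1)).filter
              (fun k => condC maxLen maxIntronLen (cur ++ ((a,b) :: rest).take (k + 1)))).map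
            (fun k => cur ++ ((a,b) :: rest).take (k + 1))
          = (if condC maxLen maxIntronLen (cur ++ [(a,b)]) then [cur ++ [(a,b)]] else [])
            ++ ((List.range rest.length).filter
              (fun k => condC maxLen maxIntronLen ((cur ++ [(a,b)]) ++ rest.take (k + 1)))).map
            (fun k => (cur ++ [(a,b)]) ++ rest.take (k + 1)) := by
        rw [List.range_succ_eq_map, List.filter_cons]
        simp only [List.take_succ_cons, List.take_zero]
        cases h0 : condC maxLen maxIntronLen (cur ++ [(a,b)]) with
        | true => simp [List.filter_map, Function.comp_def]
        | false => simp [List.filter_map, Function.comp_def]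
      simp only [List.length_cons, key, List.append_assoc]

theorem innerA_eq (exon : List (Int × Int)) (maxLen maxIntronLen : Int)
    (i : Int) (hi : 0 ≤ i) (acc : List (List (Int × Int))) :
    (PySem.List.pyRange i (exon.length : Int) 1).foldl
      (fun exonArr j =>
        let tmp := PySem.List.slice exon (some i) (some (j + 1))
        let exonLen := (tmp.map (fun p => p.2 - p.1)).sum
        if exonLen < maxLen then
          if tmp.length > 1 then
            if getMaxIntronLen tmp < maxIntronLen then exonArr ++ [tmp] else exonArr
          else exonArr ++ [tmp]
        else exonArr)
      acc
    = acc ++ accepted maxLen maxIntronLen (exon.drop i.toNat) := by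
  lift i to ℕ using hi with a
  set d := exon.drop a with hd
  have hlen : ((exon.length : Int) - (a : Int)).toNat = d.length := by
    simp [hd]
  rw [PySem.List.pyRange_one, List.foldl_map, hlen]
  have hbody : ∀ (accu : List (List (Int × Int))) (k : Nat), k ∈ List.range d.length →
      (fun exonArr (k : Nat) =>
        let tmp := PySem.List.slice exon (some (a : Int)) (some ((a : Int) + (k : Int) + 1))
        let exonLen := (tmp.map (fun p => p.2 - p.1)).sum
        if exonLen < maxLen then
          if tmp.length > 1 then
            if getMaxIntronLen tmp < maxIntronLen then exonArr ++ [tmp] else exonArr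
          else exonArr ++ [tmp]
        else exonArr) accu k
      = (fun exonArr (k : Nat) =>
          if condC maxLen maxIntronLen (d.take (k + 1)) then exonArr ++ [d.take (k + 1)]
          else exonArr) accu k := by
    intro accu k hk
    have hk' : k < d.length := List.mem_range.mp hk
    have hslice : PySem.List.slice exon (some (a : Int)) (some ((a : Int) + (k : Int) + 1))
        = d.take (k + 1) := by
      have : (a : Int) + (k : Int) + 1 = (a : Int) + ((k + 1 : Nat) : Int) := by push_cast; ring
      rw [this, PySem.List.slice_natCast_add]
    simp only [hslice]
    have hne : d.take (k + 1) ≠ [] := by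
      have : (d.take (k + 1)).length = min (k + 1) d.length := List.length_take
      intro h; rw [h] at this; simp at this; omega
    have hlen1 : (d.take (k + 1)).length = min (k + 1) d.length := List.length_take
    show (if sumLen (d.take (k+1)) < maxLen then
            if (d.take (k+1)).length > 1 then
              if getMaxIntronLen (d.take (k+1)) < maxIntronLen then accu ++ [d.take (k+1)] else accu
            else accu ++ [d.take (k+1)]
          else accu) = _
    rw [getMaxIntronLen_eq_gapMax]
    by_cases h1 : sumLen (d.take (k+1)) < maxLen
    · by_cases h2 : (d.take (k+1)).length > 1
      · by_cases h3 : gapMax (d.take (k+1)) < maxIntronLen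
        · rw [if_pos h1, if_pos h2, if_pos h3,
              if_pos (by simp [condC]; exact ⟨h1, Or.inr h3⟩)]
        · rw [if_pos h1, if_pos h2, if_neg h3,
              if_neg (by simp [condC]; intro _; exact ⟨by omega, not_lt.mp h3⟩)]
      · rw [List.length_take] at h2
        have hl1 : min (k + 1) d.length = 1 := by omega
        rw [if_pos h1, if_neg (by rw [List.length_take]; exact h2),
            if_pos (by simp [condC]; exact ⟨h1, Or.inl hl1⟩)]
    · rw [if_neg h1, if_neg (by simp [condC]; intro h; exact absurd h h1)]
  rw [PySem.List.foldl_congr_mem _ _ _ _ hbody, PySem.List.foldl_append_if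
        (fun k => condC maxLen maxIntronLen (d.take (k + 1))) (fun k => d.take (k + 1))]
  rfl

theorem outerA_eq (exon : List (Int × Int)) (maxLen maxIntronLen : Int) :
    ∀ (fuel : Nat) (a : Int) (acc : List (List (Int × Int))), 0 ≤ a →
      ((exon.length : Int) - a).toNat = fuel →
      (PySem.List.pyRange a (exon.length : Int) 1).foldl
        (fun acc i => acc ++ accepted maxLen maxIntronLen (exon.drop i.toNat)) acc
      = acc ++ tailsAcc maxLen maxIntronLen (exon.drop a.toNat) := by
  intro fuel
  induction fuel with
  | zero =>
      intro a acc ha hfuel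
      have hge : (exon.length : Int) ≤ a := by omega
      rw [PySem.List.pyRange_one_eq_nil hge, List.foldl_nil]
      have : exon.drop a.toNat = [] := by
        apply List.drop_eq_nil_of_le; omega
      rw [this]; simp [tailsAcc]
  | succ n ih =>
      intro a acc ha hfuel
      have hlt : a < (exon.length : Int) := by omega
      rw [PySem.List.pyRange_one_cons hlt, List.foldl_cons]
      rw [ih (a + 1) _ (by omega) (by omega)]
      have hdrop : exon.drop a.toNat ≠ [] := by
        intro h
        have := List.drop_eq_nil_iff.mp h
        omega
      obtain ⟨x, r, hxr⟩ := List.exists_cons_of_ne_nil hdrop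
      have hdrop1 : exon.drop (a + 1).toNat = r := by
        have h1 : (a + 1).toNat = a.toNat + 1 := by omega
        rw [h1, ← List.tail_drop, hxr]
        rfl
      rw [hxr, hdrop1]
      show acc ++ accepted maxLen maxIntronLen (x :: r) ++ tailsAcc maxLen maxIntronLen r = _
      rw [tailsAcc, List.append_assoc]

theorem circOuter_spec (maxLen maxIntronLen : Int) :
    ∀ (t : List (Int × Int)) (res : List (List (Int × Int))),
      circOuter maxLen maxIntronLen res t = res ++ tailsAcc maxLen maxIntronLen t := by
  intro t
  induction t with
  | nil => intro res; simp [circOuter, tailsAcc]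
  | cons x r ih =>
      intro res
      show circOuter maxLen maxIntronLen
        (circInner maxLen maxIntronLen [] 0 0 none res (x :: r)) r = _
      have h := circInner_spec maxLen maxIntronLen (x :: r) [] res
      simp only [sumLen, gapMax, List.map_nil, List.sum_nil, List.zip_nil_left,
        List.foldl_nil, List.getLast?_nil, Option.map_none, List.nil_append] at h
      rw [h, ih, tailsAcc]
      simp [accepted, List.append_assoc]

-- ===== VERDICT (by name: the statement is the Claim_ definition above) =====
theorem getAllCirc_spec : Claim_equal_getAllCirc := by
  intro exon maxLen maxIntronLen _
  unfold Spec_getAllCirc getAllCirc getAllCirc_alt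
  rw [circOuter_spec]
  have hcg := PySem.List.foldl_congr_mem (PySem.List.pyRange 0 (exon.length : Int) 1)
    (fun exonArr i =>
      (PySem.List.pyRange i (exon.length : Int) 1).foldl
        (fun exonArr j =>
          let tmp := PySem.List.slice exon (some i) (some (j + 1))
          let exonLen := (tmp.map (fun p => p.2 - p.1)).sum
          if exonLen < maxLen then
            if tmp.length > 1 then
              if getMaxIntronLen tmp < maxIntronLen then exonArr ++ [tmp] else exonArr
            else exonArr ++ [tmp]
          else exonArr)
        exonArr)
    (fun acc i => acc ++ accepted maxLen maxIntronLen (exon.drop i.toNat)) []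
    (by intro acc i hmem
        exact innerA_eq exon maxLen maxIntronLen i (PySem.List.mem_pyRange_one.mp hmem).1 acc)
  rw [hcg, outerA_eq exon maxLen maxIntronLen ((exon.length : Int) - 0).toNat 0 [] le_rfl rfl]
  simp
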